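-- pv_equiv track=rewrite | github.com/adambear82/advent-of-code | 2025/day-07/quantum.py | laser_hits_splitter
-- ===== SOURCE A (Python) =====
-- def normalize_rows(rows):
--     """Strip trailing spaces and assert equal widths."""
--     cleaned = [r.rstrip() for r in rows]
--     w = len(cleaned[0])
--     assert all(len(r) == w for r in cleaned), "All rows must have equal length"
--     return cleaned
--
-- def laser_hits_splitter(rows):
--     """
--     For every column, if a splitter '^' has a laser '|' directly above it,
--     mark that splitter as 'X'. Returns a NEW rows list.
--     """
--     rows = normalize_rows(rows)
--     cols = [list(col) for col in zip(*rows)]  # cols[c][r] => char at (r, c)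
--     height = len(rows)
--     width = len(rows[0])
--
--     for c in range(width):
--         for r in range(1, height):
--             if cols[c][r] == '^' and cols[c][r-1] == '|':
--                 cols[c][r] = 'X'  # splitter hit
--
--     new_rows = [''.join(row_chars) for row_chars in zip(*cols)]
--     return new_rows
-- ===== SOURCE B (Python) =====
-- def normalize_rows(rows):
--     """Strip trailing spaces and assert equal widths."""
--     cleaned = [r.rstrip() for r in rows]
--     w = len(cleaned[0])
--     assert all(len(r) == w for r in cleaned), "All rows must have equal length"
--     return cleaned
--
-- def laser_hits_splitter(rows):
--     """
--     Row-pairwise version: keep only the previous row; no transpose.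
--     output[0] is the first row unchanged; each later row is built by
--     zipping it with the row above and marking '^' under '|' as 'X'.
--     """
--     rows = normalize_rows(rows)
--     out = rows[:1]
--     for prev, cur in zip(rows, rows[1:]):
--         out.append(''.join('X' if c == '^' and p == '|' else c
--                            for p, c in zip(prev, cur)))
--     return out
-- ===== Notes on version B (the rewrite author's own statement) =====
-- stated objective: simpler
-- what changed: Instead of transposing the grid into per-column char lists, mutating them with a nested column/row index loop, and transposing back, B streams over adjacent row pairs once, building each output row by zipping it with the row above; only the previous row is consulted and no column representation exists.
-- intended difference: On non-empty inputs whose rows are all whitespace-only (width 0 after rstrip), A's zip over zero columns collapses the grid and returns [], while B returns one empty string per input row, preserving the grid height as intended. — e.g. on laser_hits_splitter([" ", ""]): A returns [], B returns ["", ""]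
import Mathlib
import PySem

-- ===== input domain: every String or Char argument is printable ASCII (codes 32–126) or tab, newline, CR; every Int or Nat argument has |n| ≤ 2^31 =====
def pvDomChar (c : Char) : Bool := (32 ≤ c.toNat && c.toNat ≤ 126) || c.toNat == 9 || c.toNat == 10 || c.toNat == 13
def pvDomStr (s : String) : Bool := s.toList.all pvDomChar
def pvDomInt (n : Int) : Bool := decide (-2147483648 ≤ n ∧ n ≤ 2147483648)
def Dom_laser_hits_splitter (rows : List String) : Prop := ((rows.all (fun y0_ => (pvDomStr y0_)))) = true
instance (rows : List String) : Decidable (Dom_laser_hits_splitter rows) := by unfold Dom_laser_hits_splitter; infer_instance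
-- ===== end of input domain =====

-- B replaces A's transpose / nested index-loop / transpose-back pipeline with a single
-- pass over adjacent row pairs (simpler); return value only, neither mutates its input.

-- ===== PORT A =====

-- zip(*rows): the columns, cut to the shortest row (exact for Python's zip)
def pvTmin (L : List (List Char)) : List (List Char) :=
  if h : L ≠ [] ∧ ∀ l ∈ L, l ≠ [] then
    (L.map (fun l => l.headD ' ')) :: pvTmin (L.map List.tail)
  else []
termination_by (L.headD []).length
decreasing_by
  rcases h with ⟨hne, hall⟩
  cases L with
  | nil => exact absurd rfl hne
  | cons l0 rest =>
    have h0 : l0 ≠ [] := hall l0 (by simp)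
    cases l0 with
    | nil => exact absurd rfl h0
    | cons a t => simp

-- the inner 'for r in range(1, height)' loop of A, acting on one column
-- (the outer 'for c in range(width)' loop is the surrounding map, column by column in order)
def pvMarkColA (height : Int) (col : List Char) : List Char :=
  (PySem.List.pyRange 1 height 1).foldl (fun col r =>
    match PySem.List.pyGet? col r, PySem.List.pyGet? col (r - 1) with
    | some c, some p => if c = '^' ∧ p = '|' then col.set r.toNat 'X' else col
    | _, _ => col) col

def laser_hits_splitter (rows : List String) : List String :=
  -- normalize_rows, inlined: IndexError on [] and AssertionError on ragged input
  -- are outside Pre_ (the port returns [] there)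
  let cleaned := rows.map PySem.Str.rstrip
  match cleaned with
  | [] => []
  | c0 :: _ =>
    let w := PySem.Str.len c0
    if cleaned.all (fun r => PySem.Str.len r == w) then
      let cols := pvTmin (cleaned.map String.toList)
      let height : Int := (cleaned.length : Int)
      let cols := cols.map (pvMarkColA height)
      (pvTmin cols).map String.ofList
    else []

-- ===== PORT B =====
def laser_hits_splitter_alt (rows : List String) : List String :=
  -- normalize_rows, inlined exactly as in A's port
  let cleaned := rows.map PySem.Str.rstrip
  match cleaned with
  | [] => []
  | c0 :: rest =>
    if cleaned.all (fun r => PySem.Str.len r == PySem.Str.len c0) then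
      c0 :: (cleaned.zip rest).map (fun pc =>
        String.ofList ((pc.1.toList.zip pc.2.toList).map
          (fun t => if t.2 = '^' ∧ t.1 = '|' then 'X' else t.2)))
    else []

-- ===== PRECONDITION & SPEC =====
-- Pre_ excludes the empty list (normalize_rows raises IndexError on cleaned[0]) and
-- inputs whose rstripped rows have unequal lengths (the assert raises AssertionError).
def Pre_laser_hits_splitter (rows : List String) : Prop :=
  rows ≠ [] ∧ ∀ r ∈ rows, PySem.Str.len (PySem.Str.rstrip r)
      = PySem.Str.len (PySem.Str.rstrip (rows.headD ""))
instance (rows : List String) : Decidable (Pre_laser_hits_splitter rows) := by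
  unfold Pre_laser_hits_splitter; infer_instance
def pvWitness_laser_hits_splitter : List String := ["|.^", "^.|"]

-- On non-empty inputs whose rows are all whitespace-only (width 0 after rstrip), A's zip
-- over zero columns collapses the grid and returns [], while B returns one empty string
-- per input row, preserving the grid height as intended.
def D_laser_hits_splitter (rows : List String) : Prop :=
  rows ≠ [] ∧ ∀ r ∈ rows, PySem.Str.rstrip r = ""
instance (rows : List String) : Decidable (D_laser_hits_splitter rows) := by
  unfold D_laser_hits_splitter; infer_instance

def Spec_laser_hits_splitter (rows : List String) (out : List String) : Prop :=
  ¬ D_laser_hits_splitter rows → out = laser_hits_splitter_alt rows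
instance (rows : List String) (out : List String) : Decidable (Spec_laser_hits_splitter rows out) := by
  unfold Spec_laser_hits_splitter; infer_instance

def pvDiffWitness_laser_hits_splitter : List String := [" ", ""]
def pvDiffWitnessOut_laser_hits_splitter : (List String) × (List String) := ([], ["", ""])

-- ===== CLAIM (what is proved, stated in full; the proofs are below) =====
def Claim_unchanged_laser_hits_splitter : Prop := ∀ (rows : List String), Dom_laser_hits_splitter rows → Pre_laser_hits_splitter rows → Spec_laser_hits_splitter rows (laser_hits_splitter rows)
def Claim_changed_laser_hits_splitter : Prop := Dom_laser_hits_splitter (pvDiffWitness_laser_hits_splitter) ∧ Pre_laser_hits_splitter (pvDiffWitness_laser_hits_splitter) ∧ D_laser_hits_splitter (pvDiffWitness_laser_hits_splitter) ∧ laser_hits_splitter (pvDiffWitness_laser_hits_splitter) = pvDiffWitnessOut_laser_hits_splitter.1 ∧ laser_hits_splitter_alt (pvDiffWitness_laser_hits_splitter) = pvDiffWitnessOut_laser_hits_splitter.2 ∧ pvDiffWitnessOut_laser_hits_splitter.1 ≠ pvDiffWitnessOut_laser_hits_splitter.2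
def Claim_exact_laser_hits_splitter : Prop := ∀ (rows : List String), Dom_laser_hits_splitter rows → Pre_laser_hits_splitter rows → D_laser_hits_splitter rows → laser_hits_splitter rows ≠ laser_hits_splitter_alt rows

-- ===== LEMMAS AND PROOFS =====

-- the mark of one char given the char directly above it
def pvG (p c : Char) : Char := if c = '^' ∧ p = '|' then 'X' else c

-- marking a column, carrying the ORIGINAL previous char
def pvMarkFrom (p : Char) : List Char → List Char
  | [] => []
  | c :: t => pvG p c :: pvMarkFrom c t

def pvMarkSpec : List Char → List Char
  | [] => []
  | a :: t => a :: pvMarkFrom a t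

-- B's recursion over rows, on char rows
def pvRowsFrom (p : List Char) : List (List Char) → List (List Char)
  | [] => []
  | r :: t => List.zipWith pvG p r :: pvRowsFrom r t

theorem pvTmin_nil : pvTmin [] = [] := by
  rw [pvTmin]; simp

theorem pvTmin_eq_cons (L : List (List Char)) (h1 : L ≠ []) (h2 : ∀ l ∈ L, l ≠ []) :
    pvTmin L = (L.map (fun l => l.headD ' ')) :: pvTmin (L.map List.tail) := by
  rw [pvTmin, dif_pos ⟨h1, h2⟩]

theorem pvTmin_eq_nil_of_mem_nil (L : List (List Char)) (l : List Char)
    (hl : l ∈ L) (hnil : l = []) : pvTmin L = [] := by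
  have hng : ¬ (L ≠ [] ∧ ∀ l ∈ L, l ≠ []) := by
    rintro ⟨-, hall⟩; exact hall l hl hnil
  rw [pvTmin, dif_neg hng]

theorem pvTmin_shape (w : Nat) : ∀ (L : List (List Char)), L ≠ [] →
    (∀ l ∈ L, l.length = w) →
    (pvTmin L).length = w ∧ ∀ c ∈ pvTmin L, c.length = L.length := by
  induction w with
  | zero =>
    intro L hne hlen
    cases L with
    | nil => exact absurd rfl hne
    | cons l0 rest =>
      have h0 : l0 = [] := by simpa using hlen l0 (by simp)
      rw [pvTmin_eq_nil_of_mem_nil _ l0 (by simp) h0]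
      simp
  | succ k ih =>
    intro L hne hlen
    have hnil : ∀ l ∈ L, l ≠ [] := by
      intro l hl hn; have := hlen l hl; simp [hn] at this
    rw [pvTmin_eq_cons L hne hnil]
    have hmapne : L.map List.tail ≠ [] := by simpa using hne
    have hmaplen : ∀ l ∈ L.map List.tail, l.length = k := by
      intro l hl
      rcases List.mem_map.mp hl with ⟨l', hl', rfl⟩
      have := hlen l' hl'
      cases l' with
      | nil => exact absurd rfl (hnil _ hl')
      | cons a t => simpa using this
    obtain ⟨hL, hC⟩ := ih (L.map List.tail) hmapne hmaplen
    refine ⟨by simp [hL], ?_⟩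
    intro c hc
    rcases List.mem_cons.mp hc with rfl | hc
    · simp
    · simpa using hC c hc

theorem pvTmin_cons (w : Nat) : ∀ (r : List Char) (rest : List (List Char)),
    r.length = w → rest ≠ [] → (∀ l ∈ rest, l.length = w) →
    pvTmin (r :: rest) = List.zipWith List.cons r (pvTmin rest) := by
  induction w with
  | zero =>
    intro r rest hr _ _
    have : r = [] := List.length_eq_zero_iff.mp hr
    subst this
    rw [pvTmin_eq_nil_of_mem_nil (([] : List Char) :: rest) [] (by simp) rfl]
    simp
  | succ k ih =>
    intro r rest hr hne hlen
    have hnil : ∀ l ∈ rest, l ≠ [] := by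
      intro l hl hn; have := hlen l hl; simp [hn] at this
    have hrne : r ≠ [] := by intro hn; simp [hn] at hr
    have hall : ∀ l ∈ r :: rest, l ≠ [] := by
      intro l hl; rcases List.mem_cons.mp hl with rfl | hl
      · exact hrne
      · exact hnil l hl
    rw [pvTmin_eq_cons _ (by simp) hall, pvTmin_eq_cons rest hne hnil]
    cases r with
    | nil => exact absurd rfl hrne
    | cons a rt =>
      simp only [List.map_cons, List.headD_cons, List.tail_cons, List.zipWith_cons_cons]
      congr 1
      have hmapne : rest.map List.tail ≠ [] := by simpa using hne
      have hmaplen : ∀ l ∈ rest.map List.tail, l.length = k := by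
        intro l hl
        rcases List.mem_map.mp hl with ⟨l', hl', rfl⟩
        have := hlen l' hl'
        cases l' with
        | nil => exact absurd rfl (hnil _ hl')
        | cons b t => simpa using this
      exact ih rt (rest.map List.tail) (by simpa using hr) hmapne hmaplen

theorem pv_map_headD_zipWith_cons : ∀ (r : List Char) (X : List (List Char)),
    r.length = X.length →
    (List.zipWith List.cons r X).map (fun l => l.headD ' ') = r := by
  intro r
  induction r with
  | nil => intro X _; simp
  | cons a t ih =>
    intro X hlen
    cases X with
    | nil => simp at hlen
    | cons x xs =>
      simp only [List.zipWith_cons_cons, List.map_cons, List.headD_cons]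
      rw [ih xs (by simpa using hlen)]

theorem pv_map_tail_zipWith_cons : ∀ (r : List Char) (X : List (List Char)),
    r.length = X.length →
    (List.zipWith List.cons r X).map List.tail = X := by
  intro r
  induction r with
  | nil =>
    intro X hlen
    have : X = [] := List.length_eq_zero_iff.mp hlen.symm
    simp [this]
  | cons a t ih =>
    intro X hlen
    cases X with
    | nil => simp at hlen
    | cons x xs =>
      simp only [List.zipWith_cons_cons, List.map_cons, List.tail_cons]
      rw [ih xs (by simpa using hlen)]

theorem pv_zipWith_cons_ne_nil : ∀ (r : List Char) (X : List (List Char)) (l : List Char),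
    l ∈ List.zipWith List.cons r X → l ≠ [] := by
  intro r
  induction r with
  | nil => intro X l hl; simp at hl
  | cons a t ih =>
    intro X l hl
    cases X with
    | nil => simp at hl
    | cons x xs =>
      rcases List.mem_cons.mp hl with rfl | hl
      · simp
      · exact ih xs l hl

theorem pvTmin_zipWith_cons (r : List Char) (X : List (List Char))
    (hr : r ≠ []) (hlen : r.length = X.length) :
    pvTmin (List.zipWith List.cons r X) = r :: pvTmin X := by
  have hne : List.zipWith List.cons r X ≠ [] := by
    cases r with
    | nil => exact absurd rfl hr
    | cons a t =>
      cases X with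
      | nil => simp at hlen
      | cons x xs => simp
  have hall : ∀ l ∈ List.zipWith List.cons r X, l ≠ [] :=
    fun l hl => pv_zipWith_cons_ne_nil r X l hl
  rw [pvTmin_eq_cons _ hne hall, pv_map_headD_zipWith_cons r X hlen,
      pv_map_tail_zipWith_cons r X hlen]

theorem pvTmin_singleton : ∀ (r : List Char), pvTmin [r] = r.map (fun c => [c]) := by
  intro r
  induction r with
  | nil => exact pvTmin_eq_nil_of_mem_nil [[]] [] (by simp) rfl
  | cons a t ih =>
    rw [pvTmin_eq_cons [a :: t] (by simp) (by simp)]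
    simp only [List.map_cons, List.map_nil, List.headD_cons, List.tail_cons]
    rw [ih]

theorem pvTmin_singcols (r : List Char) (hr : r ≠ []) :
    pvTmin (r.map (fun c => [c])) = [r] := by
  have hne : r.map (fun c => [c]) ≠ [] := by simpa using hr
  have hall : ∀ l ∈ r.map (fun c => [c]), l ≠ [] := by
    intro l hl; rcases List.mem_map.mp hl with ⟨c, -, rfl⟩; simp
  rw [pvTmin_eq_cons _ hne hall]
  have h2 : ((r.map fun c => [c]).map fun l => l.headD ' ') = r := by
    simp [List.map_map, Function.comp_def]
  have h3 : ((r.map fun c => [c]).map List.tail) = r.map (fun _ => ([] : List Char)) := by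
    simp [List.map_map, Function.comp_def]
  rw [h2, h3]
  cases r with
  | nil => exact absurd rfl hr
  | cons a t =>
    rw [pvTmin_eq_nil_of_mem_nil _ [] (by simp) rfl]

theorem pvTmin_tmin (w : Nat) (hw : 1 ≤ w) : ∀ (L : List (List Char)),
    (∀ l ∈ L, l.length = w) → pvTmin (pvTmin L) = L := by
  intro L
  induction L with
  | nil => intro _; simp [pvTmin_nil]
  | cons r rest ih =>
    intro hlen
    have hr : r.length = w := hlen r (by simp)
    have hrne : r ≠ [] := by intro hn; rw [hn] at hr; simp at hr; omega
    cases rest with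
    | nil =>
      rw [pvTmin_singleton r, pvTmin_singcols r hrne]
    | cons r2 rest2 =>
      have hlen' : ∀ l ∈ r2 :: rest2, l.length = w := by
        intro l hl; exact hlen l (by simp [hl])
      rw [pvTmin_cons w r (r2 :: rest2) hr (by simp) hlen']
      have hX : r.length = (pvTmin (r2 :: rest2)).length := by
        rw [hr, (pvTmin_shape w (r2 :: rest2) (by simp) hlen').1]
      rw [pvTmin_zipWith_cons r _ hrne hX, ih hlen']

theorem pv_zipWith_markFrom_heads : ∀ (P : List Char) (L : List (List Char)),
    (∀ c ∈ L, c ≠ []) →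
    List.zipWith pvMarkFrom P L
      = List.zipWith List.cons
          (List.zipWith pvG P (L.map (fun l => l.headD ' ')))
          (List.zipWith pvMarkFrom (L.map (fun l => l.headD ' ')) (L.map List.tail)) := by
  intro P
  induction P with
  | nil => intro L _; simp
  | cons p pt ih =>
    intro L hne
    cases L with
    | nil => simp
    | cons c ct =>
      have hc : c ≠ [] := hne c (by simp)
      cases c with
      | nil => exact absurd rfl hc
      | cons a t =>
        simp only [List.map_cons, List.headD_cons, List.tail_cons, List.zipWith_cons_cons]
        rw [ih ct (fun x hx => hne x (by simp [hx]))]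
        rfl

theorem pv_markFrom_tmin (h : Nat) : ∀ (P : List Char) (L : List (List Char)),
    (∀ c ∈ L, c.length = h) → P.length = L.length →
    pvTmin (List.zipWith pvMarkFrom P L) = pvRowsFrom P (pvTmin L) := by
  induction h with
  | zero =>
    intro P L hcl hpl
    cases L with
    | nil => simp [pvTmin_nil, pvRowsFrom]
    | cons c ct =>
      have hc : c = [] := List.length_eq_zero_iff.mp (hcl c (by simp))
      rw [pvTmin_eq_nil_of_mem_nil (c :: ct) c (by simp) hc]
      cases P with
      | nil => simp at hpl
      | cons p pt =>
        subst hc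
        rw [List.zipWith_cons_cons, show pvMarkFrom p [] = [] from rfl]
        rw [pvTmin_eq_nil_of_mem_nil _ [] (by simp) rfl]
        rfl
  | succ k ih =>
    intro P L hcl hpl
    cases L with
    | nil =>
      have : P = [] := List.length_eq_zero_iff.mp (by simpa using hpl)
      simp [this, pvTmin_nil, pvRowsFrom]
    | cons c ct =>
      cases P with
      | nil => simp at hpl
      | cons p pt =>
        have hne : ∀ x ∈ c :: ct, x ≠ [] := by
          intro x hx hn; have := hcl x hx; simp [hn] at this
        rw [pv_zipWith_markFrom_heads (p :: pt) (c :: ct) hne]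
        have hZne : List.zipWith pvG (p :: pt) ((c :: ct).map (fun l => l.headD ' ')) ≠ [] := by
          simp
        have hlen1 : (List.zipWith pvG (p :: pt) ((c :: ct).map (fun l => l.headD ' '))).length
            = (List.zipWith pvMarkFrom ((c :: ct).map (fun l => l.headD ' ')) ((c :: ct).map List.tail)).length := by
          have hpl' : pt.length = ct.length := by simpa using hpl
          simp only [List.length_zipWith, List.length_map, List.length_cons]
          omega
        rw [pvTmin_zipWith_cons _ _ hZne hlen1]
        have hTlen : ∀ x ∈ (c :: ct).map List.tail, x.length = k := by
          intro x hx
          rcases List.mem_map.mp hx with ⟨x', hx', rfl⟩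
          have := hcl x' hx'
          cases x' with
          | nil => exact absurd rfl (hne _ hx')
          | cons b bt => simpa using this
        have hHTlen : ((c :: ct).map (fun l => l.headD ' ')).length = ((c :: ct).map List.tail).length := by
          simp
        rw [ih _ _ hTlen hHTlen]
        rw [pvTmin_eq_cons (c :: ct) (by simp) hne]
        rfl

theorem pvMarkColA_loop : ∀ (rest pre : List Char) (p : Char), pre ≠ [] →
    (pre.getLastD ' ' = '|' ↔ p = '|') →
    (PySem.List.pyRange (pre.length : Int) ((pre.length : Int) + (rest.length : Int)) 1).foldl
      (fun col r =>
        match PySem.List.pyGet? col r, PySem.List.pyGet? col (r - 1) with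
        | some c, some pc => if c = '^' ∧ pc = '|' then col.set r.toNat 'X' else col
        | _, _ => col) (pre ++ rest)
      = pre ++ pvMarkFrom p rest := by
  intro rest
  induction rest with
  | nil =>
    intro pre p _ _
    rw [show ((pre.length : Int) + ((List.length ([] : List Char)) : Int)) = (pre.length : Int) by simp]
    rw [PySem.List.pyRange_one_eq_nil (le_refl _)]
    simp [pvMarkFrom]
  | cons c t ih =>
    intro pre p hpre hinv
    have hplen : 1 ≤ pre.length := by
      cases pre with
      | nil => exact absurd rfl hpre
      | cons a b => simp
    have hlt : (pre.length : Int) < (pre.length : Int) + (((c :: t).length) : Int) := by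
      simp
    rw [PySem.List.pyRange_one_cons hlt, List.foldl_cons]
    have hget1 : PySem.List.pyGet? (pre ++ c :: t) ((pre.length : Int)) = some c := by
      rw [PySem.List.pyGet?_natCast]
      simp
    have hget2 : PySem.List.pyGet? (pre ++ c :: t) ((pre.length : Int) - 1)
        = some (pre.getLastD ' ') := by
      rw [show ((pre.length : Int) - 1) = ((pre.length - 1 : Nat) : Int) by omega]
      rw [PySem.List.pyGet?_natCast]
      rw [List.getElem?_append_left (by omega)]
      rw [List.getElem?_eq_getElem (by omega)]
      congr 1
      cases pre with
      | nil => exact absurd rfl hpre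
      | cons a b =>
        rw [List.getLastD_eq_getLast?]
        rw [List.getLast?_eq_getElem?]
        rw [List.getElem?_eq_getElem (by simp)]
        simp
    rw [hget1, hget2]
    simp only []
    by_cases hcond : c = '^' ∧ pre.getLastD ' ' = '|'
    · have hcond' : c = '^' ∧ p = '|' := ⟨hcond.1, hinv.mp hcond.2⟩
      rw [if_pos hcond]
      have hset : (pre ++ c :: t).set ((pre.length : Int)).toNat 'X' = (pre ++ ['X']) ++ t := by
        simp [List.set_append]
      rw [hset]
      have hstep := ih (pre ++ ['X']) c (by simp) ?_
      · rw [show (((pre ++ ['X']).length : Nat) : Int) = (pre.length : Int) + 1 by simp] at hstep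
        rw [show ((pre.length : Int) + 1 + (t.length : Int))
              = (pre.length : Int) + (((c :: t).length) : Int) by simp; omega] at hstep
        rw [hstep]
        rw [show pvMarkFrom p (c :: t) = 'X' :: pvMarkFrom c t by
              simp [pvMarkFrom, pvG, hcond'.1, hcond'.2]]
        simp
      · constructor
        · intro hh; rw [List.getLastD_concat] at hh; simp at hh
        · intro hh; rw [hcond.1] at hh; simp at hh
    · rw [if_neg hcond]
      have hcond' : ¬ (c = '^' ∧ p = '|') := by
        rintro ⟨h1, h2⟩; exact hcond ⟨h1, hinv.mpr h2⟩
      have hstep := ih (pre ++ [c]) c (by simp) ?_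
      · rw [show (((pre ++ [c]).length : Nat) : Int) = (pre.length : Int) + 1 by simp] at hstep
        rw [show ((pre.length : Int) + 1 + (t.length : Int))
              = (pre.length : Int) + (((c :: t).length) : Int) by simp; omega] at hstep
        rw [show (pre ++ [c]) ++ t = pre ++ c :: t by simp] at hstep
        rw [hstep]
        rw [show pvMarkFrom p (c :: t) = c :: pvMarkFrom c t by
              simp [pvMarkFrom, pvG, hcond']]
        simp
      · rw [List.getLastD_concat]

theorem pvMarkColA_eq_spec (h : Nat) (col : List Char) (hlen : col.length = h) (hh : 1 ≤ h) :
    pvMarkColA (h : Int) col = pvMarkSpec col := by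
  cases col with
  | nil => simp at hlen; omega
  | cons a t =>
    have key := pvMarkColA_loop t [a] a (by simp) (by simp)
    rw [show ((([a] : List Char).length : Nat) : Int) = (1 : Int) by simp] at key
    rw [show ((1 : Int) + (t.length : Int)) = (h : Int) by
          simp only [List.length_cons] at hlen; omega] at key
    rw [show ([a] : List Char) ++ t = a :: t from rfl] at key
    unfold pvMarkColA
    rw [key]
    rfl

theorem pv_zip_map_eq_zipWith : ∀ (p c : List Char),
    (p.zip c).map (fun t => if t.2 = '^' ∧ t.1 = '|' then 'X' else t.2)
      = List.zipWith pvG p c := by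
  intro p
  induction p with
  | nil => intro c; simp
  | cons a t ih =>
    intro c
    cases c with
    | nil => simp
    | cons b bt => simp [ih bt, pvG]

theorem pv_rows_zip_eq_rowsFrom : ∀ (rest : List String) (p : String),
    ((p :: rest).zip rest).map (fun pc =>
        String.ofList ((pc.1.toList.zip pc.2.toList).map
          (fun t => if t.2 = '^' ∧ t.1 = '|' then 'X' else t.2)))
      = (pvRowsFrom p.toList (rest.map String.toList)).map String.ofList := by
  intro rest
  induction rest with
  | nil => intro p; simp [pvRowsFrom]
  | cons r t ih =>
    intro p
    simp only [List.zip_cons_cons, List.map_cons, pvRowsFrom]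
    rw [pv_zip_map_eq_zipWith]
    congr 1
    exact ih r

theorem pv_map_markSpec_zipWith_cons : ∀ (r : List Char) (X : List (List Char)),
    (List.zipWith List.cons r X).map pvMarkSpec
      = List.zipWith List.cons r (List.zipWith pvMarkFrom r X) := by
  intro r
  induction r with
  | nil => intro X; simp
  | cons a t ih =>
    intro X
    cases X with
    | nil => simp
    | cons x xs => simp [pvMarkSpec, ih xs]

theorem pv_map_markSpec_singcols (r : List Char) :
    (r.map (fun c => [c])).map pvMarkSpec = r.map (fun c => [c]) := by
  simp only [List.map_map]
  exact List.map_congr_left (fun c _ => rfl)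

theorem pv_ofList_rstrip (s : String) :
    String.ofList (PySem.Chars.rstrip s.toList) = PySem.Str.rstrip s := by
  rw [← PySem.Str.toList_rstrip, String.ofList_toList]

-- ===== VERDICT (by name: the statement is the Claim_ definition above) =====
theorem laser_hits_splitter_spec : Claim_unchanged_laser_hits_splitter := by
  intro rows _ hpre
  unfold Spec_laser_hits_splitter
  intro hnd
  rcases hpre with ⟨hne, -⟩
  cases rows with
  | nil => exact absurd rfl hne
  | cons r0 rrest =>
    simp only [laser_hits_splitter, laser_hits_splitter_alt, List.map_cons]
    by_cases hcond : ((PySem.Str.rstrip r0 :: rrest.map PySem.Str.rstrip).all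
        (fun r => PySem.Str.len r == PySem.Str.len (PySem.Str.rstrip r0))) = true
    · rw [if_pos hcond, if_pos hcond]
      rw [show ((PySem.Str.rstrip r0).toList :: (rrest.map PySem.Str.rstrip).map String.toList)
            = ((PySem.Str.rstrip r0 :: rrest.map PySem.Str.rstrip).map String.toList)
          from rfl]
      -- widths all agree (from the assert's condition itself)
      have hlen' : ∀ s ∈ PySem.Str.rstrip r0 :: rrest.map PySem.Str.rstrip,
          PySem.Str.len s = PySem.Str.len (PySem.Str.rstrip r0) := by
        intro s hs
        exact beq_iff_eq.mp (List.all_eq_true.mp hcond s hs)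
      have hM : ∀ l ∈ (PySem.Str.rstrip r0 :: rrest.map PySem.Str.rstrip).map String.toList,
          l.length = (PySem.Str.rstrip r0).toList.length := by
        intro l hl
        rcases List.mem_map.mp hl with ⟨s, hs, rfl⟩
        have := hlen' s hs
        rw [PySem.Str.len_eq, PySem.Str.len_eq] at this
        exact_mod_cast this
      -- ¬ D_ gives a positive width
      have hw : 1 ≤ (PySem.Str.rstrip r0).toList.length := by
        have hex : ∃ r ∈ r0 :: rrest, PySem.Str.rstrip r ≠ "" := by
          by_contra hterm
          push_neg at hterm
          exact hnd ⟨by simp, hterm⟩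
        rcases hex with ⟨r, hr, hrne⟩
        have hmem : PySem.Str.rstrip r ∈ PySem.Str.rstrip r0 :: rrest.map PySem.Str.rstrip := by
          rcases List.mem_cons.mp hr with rfl | hr
          · simp
          · exact List.mem_cons_of_mem _ (List.mem_map.mpr ⟨r, hr, rfl⟩)
        have hl := hM (PySem.Str.rstrip r).toList (List.mem_map.mpr ⟨_, hmem, rfl⟩)
        have hnil : (PySem.Str.rstrip r).toList ≠ [] := by
          intro hn
          exact hrne (String.toList_eq_nil_iff.mp hn)
        have hpos : 0 < (PySem.Str.rstrip r).toList.length :=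
          List.length_pos_iff.mpr hnil
        omega
      -- step 1: the index loop on each column is pvMarkSpec
      have hcols := pvTmin_shape ((PySem.Str.rstrip r0).toList.length)
        ((PySem.Str.rstrip r0 :: rrest.map PySem.Str.rstrip).map String.toList) (by simp) hM
      have hstep1 : (pvTmin ((PySem.Str.rstrip r0 :: rrest.map PySem.Str.rstrip).map String.toList)).map
            (pvMarkColA (((PySem.Str.rstrip r0 :: rrest.map PySem.Str.rstrip).length : Nat) : Int))
          = (pvTmin ((PySem.Str.rstrip r0 :: rrest.map PySem.Str.rstrip).map String.toList)).map
            pvMarkSpec := by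
        apply List.map_congr_left
        intro col hcol
        have hcl : col.length = (PySem.Str.rstrip r0 :: rrest.map PySem.Str.rstrip).length := by
          simpa using hcols.2 col hcol
        exact pvMarkColA_eq_spec _ col hcl (by simp)
      rw [hstep1]
      -- step 2: transpose–mark–transpose equals the row-pairwise recursion
      cases hcr : rrest.map PySem.Str.rstrip with
      | nil =>
        have hc0ne : (PySem.Str.rstrip r0).toList ≠ [] := by
          intro hn; rw [hn] at hw; simp at hw
        rw [show ((PySem.Str.rstrip r0 :: ([] : List String)).map String.toList)
              = [(PySem.Str.rstrip r0).toList] by simp]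
        rw [pvTmin_singleton, pv_map_markSpec_singcols, pvTmin_singcols _ hc0ne]
        simp [pv_ofList_rstrip]
      | cons m ms =>
        try rw [hcr]
        have hMr : ∀ l ∈ (m :: ms).map String.toList,
            l.length = (PySem.Str.rstrip r0).toList.length := by
          intro l hl
          have h2 : l ∈ List.map String.toList (List.map PySem.Str.rstrip rrest) := by
            rw [hcr]; exact hl
          exact hM l (List.mem_cons_of_mem _ h2)
        have hc0ne : (PySem.Str.rstrip r0).toList ≠ [] := by
          intro hn; rw [hn] at hw; simp at hw
        rw [show ((PySem.Str.rstrip r0 :: m :: ms).map String.toList)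
              = (PySem.Str.rstrip r0).toList :: (m :: ms).map String.toList by simp]
        rw [pvTmin_cons ((PySem.Str.rstrip r0).toList.length) _ _ rfl (by simp) hMr]
        rw [pv_map_markSpec_zipWith_cons]
        have hshp := pvTmin_shape ((PySem.Str.rstrip r0).toList.length)
          ((m :: ms).map String.toList) (by simp) hMr
        have hXlen : (PySem.Str.rstrip r0).toList.length
            = (List.zipWith pvMarkFrom (PySem.Str.rstrip r0).toList
                (pvTmin ((m :: ms).map String.toList))).length := by
          rw [List.length_zipWith, hshp.1, Nat.min_self]
        rw [pvTmin_zipWith_cons _ _ hc0ne hXlen]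
        rw [pv_markFrom_tmin ((m :: ms).map String.toList).length
              (PySem.Str.rstrip r0).toList (pvTmin ((m :: ms).map String.toList))
              (fun c hc => hshp.2 c hc) (by rw [hshp.1])]
        rw [pvTmin_tmin ((PySem.Str.rstrip r0).toList.length) hw
              ((m :: ms).map String.toList) hMr]
        rw [List.map_cons]
        rw [pv_rows_zip_eq_rowsFrom (m :: ms) (PySem.Str.rstrip r0)]
        simp [pv_ofList_rstrip]
    · rw [if_neg hcond, if_neg hcond]

theorem laser_hits_splitter_changed : Claim_changed_laser_hits_splitter := by
  unfold Claim_changed_laser_hits_splitter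
  refine ⟨by decide, by decide, by decide, ?_, by decide, by decide⟩
  simp only [pvDiffWitness_laser_hits_splitter, pvDiffWitnessOut_laser_hits_splitter]
  simp only [laser_hits_splitter, List.map_cons]
  rw [if_pos (by decide)]
  have hN : pvTmin ((PySem.Str.rstrip " ").toList :: (PySem.Str.rstrip "").toList
        :: List.map String.toList (List.map PySem.Str.rstrip ([] : List String))) = [] :=
    pvTmin_eq_nil_of_mem_nil
      ((PySem.Str.rstrip " ").toList :: (PySem.Str.rstrip "").toList
        :: List.map String.toList (List.map PySem.Str.rstrip ([] : List String)))
      ((PySem.Str.rstrip " ").toList) (by simp) (by decide)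
  rw [hN]
  simp [pvTmin_nil]

theorem laser_hits_splitter_tight : Claim_exact_laser_hits_splitter := by
  intro rows _ hpre hd
  rcases hpre with ⟨hne, -⟩
  rcases hd with ⟨-, hws⟩
  cases rows with
  | nil => exact absurd rfl hne
  | cons r0 rrest =>
    have hr0 : PySem.Str.rstrip r0 = "" := hws r0 (by simp)
    have hcond : ((PySem.Str.rstrip r0 :: rrest.map PySem.Str.rstrip).all
        (fun r => PySem.Str.len r == PySem.Str.len (PySem.Str.rstrip r0))) = true := by
      rw [List.all_eq_true]
      intro x hx
      rcases List.mem_cons.mp hx with rfl | hx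
      · simp
      · rcases List.mem_map.mp hx with ⟨r, hr, rfl⟩
        rw [hws r (by simp [hr]), hr0]
        decide
    have hA : laser_hits_splitter (r0 :: rrest) = [] := by
      simp only [laser_hits_splitter, List.map_cons]
      rw [if_pos hcond]
      have hN : pvTmin ((PySem.Str.rstrip r0).toList
            :: (rrest.map PySem.Str.rstrip).map String.toList) = [] :=
        pvTmin_eq_nil_of_mem_nil
          ((PySem.Str.rstrip r0).toList :: (rrest.map PySem.Str.rstrip).map String.toList)
          ((PySem.Str.rstrip r0).toList) (by simp) (by rw [hr0]; decide)
      rw [hN]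
      simp [pvTmin_nil]
    have hB : laser_hits_splitter_alt (r0 :: rrest) ≠ [] := by
      simp only [laser_hits_splitter_alt, List.map_cons]
      rw [if_pos hcond]
      simp
    rw [hA]
    exact fun hcontr => hB hcontr.symm
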